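-- pv_equiv track=rewrite | github.com/jusaviin/adventOfCode | 2024/day7/checkCalibrations.py | findPossibleResults
-- ===== SOURCE A (Python) =====
-- def findPossibleResults(operands):
--
--     possibleResults = []
--
--     # If there are only two operands left, the three possbile results are addition, multiplication and concatenation of these two operands
--     if len(operands) == 2:
--         possibleResults.append(operands[0] * operands[1])
--         possibleResults.append(operands[0] + operands[1])
--         possibleResults.append(int(str(operands[0]) + str(operands[1])))
--         return possibleResults
--
--     # If there are more than two operands left, replace the first two operands in the list with operated results
--     additionOperands = []
--     additionOperands.append(operands[0] + operands[1])
--     multiplicationOperands = []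
--     multiplicationOperands.append(operands[0] * operands[1])
--     concatenationOperands = []
--     concatenationOperands.append(int(str(operands[0]) + str(operands[1])))
--
--     for i in range(2, len(operands)):
--         additionOperands.append(operands[i])
--         multiplicationOperands.append(operands[i])
--         concatenationOperands.append(operands[i])
--
--     # Find the possible results for the new set of operands where the first operation has been performed
--     possibleResults = possibleResults + findPossibleResults(additionOperands)
--     possibleResults = possibleResults + findPossibleResults(multiplicationOperands)
--     possibleResults = possibleResults + findPossibleResults(concatenationOperands)
--
--     # Return all possible results
--     return possibleResults
-- ===== SOURCE B (Python) =====
-- def findPossibleResults(operands):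
--     # Iterative left-to-right accumulation instead of A's branching recursion.
--     results = [operands[0]]
--     for op in operands[1:-1]:
--         results = [r2 for r in results for r2 in (r + op, r * op, int(str(r) + str(op)))]
--     last = operands[-1]
--     return [r2 for r in results for r2 in (r * last, r + last, int(str(r) + str(last)))]
-- ===== Notes on version B (the rewrite author's own statement) =====
-- stated objective: simpler
-- what changed: Replaces A's three-way branching recursion (which rebuilds a fresh operand list for each branch) by a single iterative left-to-right accumulation that rebuilds one results list per operand, with the final operand expanded in A's base-case order.
-- outside the precondition, e.g. on findPossibleResults([5]): A raises IndexError, B returns [25, 10, 55]; on findPossibleResults([3, -2]): A raises ValueError, B raises ValueError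
import Mathlib
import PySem

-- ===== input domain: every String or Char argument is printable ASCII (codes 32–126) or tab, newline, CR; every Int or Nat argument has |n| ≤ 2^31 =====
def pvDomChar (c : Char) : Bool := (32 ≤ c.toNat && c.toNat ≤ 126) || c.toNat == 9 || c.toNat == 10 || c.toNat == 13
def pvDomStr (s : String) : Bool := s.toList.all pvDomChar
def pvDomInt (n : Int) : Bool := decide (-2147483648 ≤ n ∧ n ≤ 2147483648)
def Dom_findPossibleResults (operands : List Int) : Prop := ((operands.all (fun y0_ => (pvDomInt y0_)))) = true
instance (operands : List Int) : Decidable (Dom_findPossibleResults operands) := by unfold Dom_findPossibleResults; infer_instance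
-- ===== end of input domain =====

-- B replaces A's three-way branching recursion by a single iterative left-to-right
-- accumulation over the operands (objective: simpler; equivalence is on the return value).

-- ===== PORT A =====
-- int(str(a) + str(b)) ; Python raises ValueError when the concatenation is not an int
-- literal (b negative) — those inputs are excluded by Pre_, the `getD 0` is never reached there.
def pyConcat (a b : Int) : Int :=
  (PySem.Int.ofStr? ((PySem.Int.toStr a) ++ (PySem.Int.toStr b))).getD 0

def findPossibleResults (operands : List Int) : List Int :=
  match operands with
  | [a, b] =>
      -- base case: [a*b, a+b, int(str(a)+str(b))]
      [a * b, a + b, pyConcat a b]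
  | a :: b :: c :: rest =>
      -- replace the first two operands by each combined value and recurse
      findPossibleResults ((a + b) :: c :: rest) ++
      findPossibleResults ((a * b) :: c :: rest) ++
      findPossibleResults ((pyConcat a b) :: c :: rest)
  | _ => []  -- len(operands) < 2: Python raises IndexError (excluded by Pre_)
termination_by operands.length
decreasing_by all_goals simp

-- ===== PORT B =====
-- results = [r2 for r in results for r2 in (r+op, r*op, int(str(r)+str(op)))]
def expandMid (rs : List Int) (op : Int) : List Int :=
  rs.flatMap (fun r => [r + op, r * op, pyConcat r op])

-- the final comprehension: (r*last, r+last, int(str(r)+str(last)))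
def expandLast (rs : List Int) (op : Int) : List Int :=
  rs.flatMap (fun r => [r * op, r + op, pyConcat r op])

def findPossibleResults_alt (operands : List Int) : List Int :=
  -- operands[0]; on the empty list Python raises IndexError (excluded by Pre_)
  let results : List Int := [(PySem.List.pyGet? operands 0).getD 0]
  -- for op in operands[1:-1]
  let results := (PySem.List.slice (PySem.List.slice operands (some 1) none) none (some (-1))).foldl expandMid results
  -- last = operands[-1]
  let last := (PySem.List.pyGet? operands (-1)).getD 0
  expandLast results last

-- ===== PRECONDITION & SPEC =====
-- Pre_ excludes exactly the inputs where Python A raises: len < 2 (IndexError on operands[0]/[1])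
-- and lists with a negative operand after the first (int(str(r)+str(op)) raises ValueError there).
def Pre_findPossibleResults (operands : List Int) : Prop :=
  2 ≤ operands.length ∧ ∀ x ∈ operands.tail, 0 ≤ x
instance (operands : List Int) : Decidable (Pre_findPossibleResults operands) := by
  unfold Pre_findPossibleResults; infer_instance

def pvWitness_findPossibleResults : List Int := [3, 5, 2]

def Spec_findPossibleResults (operands : List Int) (out : List Int) : Prop := out = findPossibleResults_alt operands
instance (operands : List Int) (out : List Int) : Decidable (Spec_findPossibleResults operands out) := by unfold Spec_findPossibleResults; infer_instance

-- ===== CLAIM (what is proved, stated in full; the proofs are below) =====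
def Claim_equal_findPossibleResults : Prop := ∀ (operands : List Int), Dom_findPossibleResults operands → Pre_findPossibleResults operands → Spec_findPossibleResults operands (findPossibleResults operands)

-- ===== LEMMAS AND PROOFS =====

theorem expandMid_append (xs ys : List Int) (op : Int) :
    expandMid (xs ++ ys) op = expandMid xs op ++ expandMid ys op := by
  simp [expandMid]

theorem expandLast_append (xs ys : List Int) (op : Int) :
    expandLast (xs ++ ys) op = expandLast xs op ++ expandLast ys op := by
  simp [expandLast]

theorem foldl_expandMid_append (mid : List Int) (xs ys : List Int) :
    mid.foldl expandMid (xs ++ ys) = mid.foldl expandMid xs ++ mid.foldl expandMid ys := by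
  induction mid generalizing xs ys with
  | nil => rfl
  | cons m mid ih => simp only [List.foldl_cons, expandMid_append, ih]

-- one unfolding step of A for three or more operands
theorem fpr_cons3 (a b : Int) (t : List Int) (ht : t ≠ []) :
    findPossibleResults (a :: b :: t) =
      findPossibleResults ((a + b) :: t) ++ findPossibleResults ((a * b) :: t) ++
      findPossibleResults ((pyConcat a b) :: t) := by
  cases t with
  | nil => cases ht rfl
  | cons c rest => simp only [findPossibleResults]

-- the core equivalence: A on a :: mid ++ [last] is the iterative accumulation
theorem findPossibleResults_eq_iter (mid : List Int) (a last : Int) :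
    findPossibleResults (a :: (mid ++ [last])) = expandLast (mid.foldl expandMid [a]) last := by
  induction mid generalizing a with
  | nil => simp [findPossibleResults, expandLast, List.flatMap]
  | cons b mid ih =>
      rw [show a :: ((b :: mid) ++ [last]) = a :: b :: (mid ++ [last]) from rfl,
        fpr_cons3 _ _ _ (by simp), ih, ih, ih]
      simp only [List.foldl_cons]
      rw [show expandMid [a] b = [a + b] ++ ([a * b] ++ [pyConcat a b]) from rfl,
        foldl_expandMid_append, foldl_expandMid_append, expandLast_append, expandLast_append]
      simp

theorem alt_eval (mid : List Int) (a last : Int) :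
    findPossibleResults_alt (a :: (mid ++ [last])) = expandLast (mid.foldl expandMid [a]) last := by
  simp only [findPossibleResults_alt, PySem.List.slice_from_one, List.tail_cons,
    PySem.List.slice_to_neg_one, List.dropLast_concat, PySem.List.pyGet?_zero_cons,
    Option.getD_some, PySem.List.pyGet?_neg_one]
  rw [show (a :: (mid ++ [last])) = (a :: mid) ++ [last] by simp, List.getLast?_concat]
  rfl

-- ===== VERDICT (by name: the statement is the Claim_ definition above) =====
theorem findPossibleResults_spec : Claim_equal_findPossibleResults := by
  intro operands _ hpre
  obtain ⟨hlen, -⟩ := hpre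
  cases operands with
  | nil => simp at hlen
  | cons a rest =>
    have hne : rest ≠ [] := by rintro rfl; simp at hlen
    unfold Spec_findPossibleResults
    rw [show a :: rest = a :: (rest.dropLast ++ [rest.getLast hne]) by
          rw [List.dropLast_concat_getLast hne]]
    rw [findPossibleResults_eq_iter, alt_eval]
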